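-- pv_equiv track=rewrite | github.com/jautung/advent | advent2025/2.py | is_invalid_id_divisor
-- ===== SOURCE A (Python) =====
-- def is_invalid_id_divisor(num, div):
--     s = str(num)
--     l = len(s)
--     if l % div != 0:
--         return False
--     substr_len = l//div
--     matcher = s[:substr_len]
--     for index in range(div):
--         if s[index * substr_len:(index+1) * substr_len] != matcher:
--             return False
--     return True
-- ===== SOURCE B (Python) =====
-- def is_invalid_id_divisor(num, div):
--     s = str(num)
--     l = len(s)
--     if l % div != 0:
--         return False
--     return s == s[:l // div] * div
-- ===== Notes on version B (the rewrite author's own statement) =====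
-- stated objective: idiomatic
-- what changed: B replaces A's per-block loop (slicing and comparing each of the div blocks against the first) by rebuilding the whole string as the first block repeated div times and comparing once.
-- intended difference: For negative div that divides len(str(num)), A's block loop range(div) is empty so A accidentally returns True; B returns False, the intended answer since a string cannot consist of a negative number of identical blocks. — e.g. on is_invalid_id_divisor(12, -2): A returns true, B returns false
import Mathlib
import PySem

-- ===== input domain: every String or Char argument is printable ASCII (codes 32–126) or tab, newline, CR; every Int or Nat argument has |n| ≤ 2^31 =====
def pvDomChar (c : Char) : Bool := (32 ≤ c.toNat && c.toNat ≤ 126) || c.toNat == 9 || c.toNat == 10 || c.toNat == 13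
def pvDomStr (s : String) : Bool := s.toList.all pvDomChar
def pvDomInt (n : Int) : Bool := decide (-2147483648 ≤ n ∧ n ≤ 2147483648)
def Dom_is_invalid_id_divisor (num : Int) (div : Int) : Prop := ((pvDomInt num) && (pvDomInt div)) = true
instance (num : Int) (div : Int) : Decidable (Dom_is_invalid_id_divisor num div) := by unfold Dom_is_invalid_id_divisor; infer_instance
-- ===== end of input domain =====

-- B rebuilds the whole string as the first block repeated div times and compares once,
-- instead of A's loop comparing each block; B intentionally answers False for negative div (see D_ below).

-- ===== PORT A =====
def is_invalid_id_divisor (num : Int) (div : Int) : Bool :=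
  let s := (PySem.Int.toStr num).toList
  let l : Int := (s.length : Int)
  if PySem.Int.mod l div ≠ 0 then false
  else
    let substr_len := PySem.Int.floordiv l div
    let matcher := PySem.List.slice s none (some substr_len)
    -- 'for index in range(div): if block ≠ matcher: return False' then 'return True'
    (PySem.List.pyRange 0 div 1).all (fun index =>
      PySem.List.slice s (some (index * substr_len)) (some ((index + 1) * substr_len)) == matcher)

-- ===== PORT B =====
def is_invalid_id_divisor_alt (num : Int) (div : Int) : Bool :=
  let s := (PySem.Int.toStr num).toList
  let l : Int := (s.length : Int)
  if PySem.Int.mod l div ≠ 0 then false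
  else
    s == PySem.List.pyRepeat (PySem.List.slice s none (some (PySem.Int.floordiv l div))) div

-- ===== PRECONDITION & SPEC =====
-- Pre_ excludes only div = 0, where Python A raises ZeroDivisionError on 'l % div'.
def Pre_is_invalid_id_divisor (num : Int) (div : Int) : Prop := div ≠ 0
instance (num : Int) (div : Int) : Decidable (Pre_is_invalid_id_divisor num div) := by unfold Pre_is_invalid_id_divisor; infer_instance
def pvWitness_is_invalid_id_divisor : Int × Int := (121212, 3)

-- For negative div that divides len(str(num)), A's block loop range(div) is empty so A accidentally
-- returns True; B returns False, the intended answer since a string cannot consist of a negative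
-- number of identical blocks.
def D_is_invalid_id_divisor (num : Int) (div : Int) : Prop :=
  div < 0 ∧ PySem.Int.mod ((PySem.Int.toChars num).length : Int) div = 0
instance (num : Int) (div : Int) : Decidable (D_is_invalid_id_divisor num div) := by unfold D_is_invalid_id_divisor; infer_instance

def Spec_is_invalid_id_divisor (num : Int) (div : Int) (out : Bool) : Prop :=
  ¬ D_is_invalid_id_divisor num div → out = is_invalid_id_divisor_alt num div
instance (num : Int) (div : Int) (out : Bool) : Decidable (Spec_is_invalid_id_divisor num div out) := by unfold Spec_is_invalid_id_divisor; infer_instance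

def pvDiffWitness_is_invalid_id_divisor : Int × Int := (12, -2)
def pvDiffWitnessOut_is_invalid_id_divisor : Bool × Bool := (true, false)

-- ===== CLAIM (what is proved, stated in full; the proofs are below) =====
def Claim_unchanged_is_invalid_id_divisor : Prop := ∀ (num : Int) (div : Int), Dom_is_invalid_id_divisor num div → Pre_is_invalid_id_divisor num div → Spec_is_invalid_id_divisor num div (is_invalid_id_divisor num div)
def Claim_changed_is_invalid_id_divisor : Prop := Dom_is_invalid_id_divisor (pvDiffWitness_is_invalid_id_divisor.1) (pvDiffWitness_is_invalid_id_divisor.2) ∧ Pre_is_invalid_id_divisor (pvDiffWitness_is_invalid_id_divisor.1) (pvDiffWitness_is_invalid_id_divisor.2) ∧ D_is_invalid_id_divisor (pvDiffWitness_is_invalid_id_divisor.1) (pvDiffWitness_is_invalid_id_divisor.2) ∧ is_invalid_id_divisor (pvDiffWitness_is_invalid_id_divisor.1) (pvDiffWitness_is_invalid_id_divisor.2) = pvDiffWitnessOut_is_invalid_id_divisor.1 ∧ is_invalid_id_divisor_alt (pvDiffWitness_is_invalid_id_divisor.1) (pvDiffWitness_is_invalid_id_divisor.2) = pvDiffWitnessOut_is_invalid_id_divisor.2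 ∧ pvDiffWitnessOut_is_invalid_id_divisor.1 ≠ pvDiffWitnessOut_is_invalid_id_divisor.2
def Claim_exact_is_invalid_id_divisor : Prop := ∀ (num : Int) (div : Int), Dom_is_invalid_id_divisor num div → Pre_is_invalid_id_divisor num div → D_is_invalid_id_divisor num div → is_invalid_id_divisor num div ≠ is_invalid_id_divisor_alt num div

-- ===== LEMMAS AND PROOFS =====

theorem tdc_len (b : Nat) : ∀ (fuel n : Nat) (ds : List Char), 0 < fuel → ds.length < (Nat.toDigitsCore b fuel n ds).length := by
  intro fuel
  induction fuel with
  | zero => intro n ds h; omega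
  | succ f ih =>
      intro n ds _
      show ds.length < (if n / b = 0 then (n % b).digitChar :: ds else Nat.toDigitsCore b f (n / b) ((n % b).digitChar :: ds)).length
      split
      · simp
      · cases f with
        | zero => simp [Nat.toDigitsCore]
        | succ g =>
            calc ds.length < ((n % b).digitChar :: ds).length := by simp
              _ < _ := ih _ _ (by omega)

theorem toDigits_ne_nil (n : Nat) : Nat.toDigits 10 n ≠ [] := by
  intro h
  have h2 := tdc_len 10 (n+1) n [] (by omega)
  have he : Nat.toDigits 10 n = Nat.toDigitsCore 10 (n+1) n [] := rfl
  rw [← he, h] at h2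
  simp at h2

-- str(num) is never the empty string.
theorem toChars_ne_nil (n : Int) : PySem.Int.toChars n ≠ [] := by
  unfold PySem.Int.toChars
  split
  · simp
  · exact toDigits_ne_nil n.toNat

-- Core characterisation: all d blocks of length k equal b iff the list is b repeated d times.
theorem blocks_eq_iff (b : List Char) (k : Nat) (hb : b.length = k) :
    ∀ (d : Nat) (s : List Char), s.length = d * k →
      ((∀ i < d, (s.drop (i * k)).take k = b) ↔ s = (List.replicate d b).flatten) := by
  intro d
  induction d with
  | zero =>
      intro s hs
      simp only [Nat.zero_mul] at hs
      have : s = [] := List.eq_nil_of_length_eq_zero hs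
      simp [this]
  | succ d ih =>
      intro s hs
      have hs' : s.length = k + d * k := by rw [hs]; ring
      have ht : (s.drop k).length = d * k := by simp [List.length_drop, hs']
      constructor
      · intro h
        have h0 : s.take k = b := by simpa using h 0 (Nat.succ_pos d)
        have htb : s.drop k = (List.replicate d b).flatten := by
          refine (ih (s.drop k) ht).mp ?_
          intro i hi
          have h2 := h (i + 1) (by omega)
          rw [show (i+1) * k = k + i * k by ring] at h2
          rwa [← List.drop_drop] at h2
        calc s = s.take k ++ s.drop k := (List.take_append_drop k s).symm
          _ = b ++ (List.replicate d b).flatten := by rw [h0, htb]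
          _ = (List.replicate (d + 1) b).flatten := by simp [List.replicate_succ]
      · intro h i hi
        have hsplit : s = b ++ (List.replicate d b).flatten := by
          rw [h]; simp [List.replicate_succ]
        have htb : s.drop k = (List.replicate d b).flatten := by
          rw [hsplit, ← hb, List.drop_left]
        cases i with
        | zero =>
            simp only [Nat.zero_mul, List.drop_zero]
            rw [hsplit, ← hb, List.take_left]
        | succ j =>
            have h2 := (ih (s.drop k) ht).mpr htb j (by omega)
            rw [List.drop_drop] at h2
            rwa [show (j+1) * k = k + j * k by ring]

-- ===== VERDICT (by name: the statement is the Claim_ definition above) =====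
theorem is_invalid_id_divisor_spec : Claim_unchanged_is_invalid_id_divisor := by
  intro num div _ hpre hD
  unfold Pre_is_invalid_id_divisor at hpre
  unfold D_is_invalid_id_divisor at hD
  unfold is_invalid_id_divisor is_invalid_id_divisor_alt
  simp only [PySem.Int.toList_toStr]
  set s := PySem.Int.toChars num with hsdef
  set l : Int := (s.length : Int) with hldef
  by_cases hm : PySem.Int.mod l div = 0
  · -- remainder zero; since ¬D_, div must be positive
    have hdivpos : 0 < div := by
      rcases lt_trichotomy div 0 with h | h | h
      · exact absurd ⟨h, hm⟩ hD
      · exact absurd h hpre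
      · exact h
    have hdvd : div ∣ l := (PySem.Int.mod_eq_zero_iff_dvd l div).mp hm
    have hfd : PySem.Int.floordiv l div = l / div := PySem.Int.floordiv_eq_ediv_of_pos hdivpos
    -- work with Nat values d and k
    set d : Nat := div.toNat with hddef
    set k : Nat := (l / div).toNat with hkdef
    have hdz : div = (d : Int) := by omega
    have hlnn : 0 ≤ l := by positivity
    have hknn : 0 ≤ l / div := Int.ediv_nonneg hlnn (le_of_lt hdivpos)
    have hkz : l / div = (k : Int) := by omega
    have hl2 : l / div * div = l := Int.ediv_mul_cancel hdvd
    have hcast : ((k * d : Nat) : Int) = (s.length : Int) := by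
      push_cast
      rw [← hkz, ← hdz, hl2, hldef]
    have hlen : s.length = d * k := by
      rw [Nat.mul_comm]
      exact_mod_cast hcast.symm
    have hkle : k ≤ s.length := by
      have hd1 : 1 ≤ d := by omega
      calc k = 1 * k := (one_mul k).symm
        _ ≤ d * k := Nat.mul_le_mul_right k hd1
        _ = s.length := hlen.symm
    have hbl : (s.take k).length = k := by simp [hkle]
    -- matcher = s.take k
    simp only [hm, hfd, hkz]
    rw [if_neg (fun h : (0:Int) ≠ 0 => h rfl), if_neg (fun h : (0:Int) ≠ 0 => h rfl),
        PySem.List.slice_to_natCast]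
    -- each slice in the loop is a drop/take block
    have hblock : ∀ i : Int, 0 ≤ i →
        PySem.List.slice s (some (i * (k : Int))) (some ((i + 1) * (k : Int))) =
          (s.drop (i.toNat * k)).take k := by
      intro i hi
      have h1 : i * (k : Int) = ((i.toNat * k : Nat) : Int) := by
        push_cast; rw [Int.toNat_of_nonneg hi]
      have h2 : (i + 1) * (k : Int) = ((i.toNat * k : Nat) : Int) + ((k : Nat) : Int) := by
        push_cast; rw [Int.toNat_of_nonneg hi]; ring
      rw [h1, h2, PySem.List.slice_natCast_add]
    -- convert the pyRange-all to a ∀ over Nat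
    have hall : ((PySem.List.pyRange 0 div 1).all (fun index =>
        PySem.List.slice s (some (index * (k : Int))) (some ((index + 1) * (k : Int))) == s.take k))
        = true ↔ ∀ i < d, (s.drop (i * k)).take k = s.take k := by
      rw [List.all_eq_true]
      constructor
      · intro h i hi
        have hmem : (i : Int) ∈ PySem.List.pyRange 0 div 1 := by
          rw [PySem.List.mem_pyRange_one]; omega
        have := h _ hmem
        rw [hblock (i : Int) (by omega)] at this
        simpa using this
      · intro h x hx
        rw [PySem.List.mem_pyRange_one] at hx
        rw [hblock x hx.1]
        have : x.toNat < d := by omega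
        simpa using h x.toNat this
    have hiff := blocks_eq_iff (s.take k) k hbl d s hlen
    have hrep : PySem.List.pyRepeat (s.take k) div = (List.replicate d (s.take k)).flatten := by
      unfold PySem.List.pyRepeat
      rw [← hddef]
    rw [hrep]
    by_cases hP : ∀ i < d, (s.drop (i * k)).take k = s.take k
    · rw [hall.mpr hP, (beq_iff_eq.mpr (hiff.mp hP)).symm]
    · have h1 : ((PySem.List.pyRange 0 div 1).all (fun index =>
          PySem.List.slice s (some (index * (k : Int))) (some ((index + 1) * (k : Int))) == s.take k)) = false := by
        rcases Bool.eq_false_or_eq_true ((PySem.List.pyRange 0 div 1).all (fun index =>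
            PySem.List.slice s (some (index * (k : Int))) (some ((index + 1) * (k : Int))) == s.take k)) with h | h
        · exact absurd (hall.mp h) hP
        · exact h
      have h2 : s ≠ (List.replicate d (s.take k)).flatten := fun hx => hP (hiff.mpr hx)
      rw [h1, (beq_eq_false_iff_ne.mpr h2).symm]
  · -- remainder nonzero: both return false
    simp [hm]

theorem is_invalid_id_divisor_changed : Claim_changed_is_invalid_id_divisor := by
  unfold Claim_changed_is_invalid_id_divisor; decide

theorem is_invalid_id_divisor_tight : Claim_exact_is_invalid_id_divisor := by
  intro num div _ _ hD
  obtain ⟨hneg, hm⟩ := hD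
  unfold is_invalid_id_divisor is_invalid_id_divisor_alt
  simp only [PySem.Int.toList_toStr]
  have hrange : PySem.List.pyRange 0 div 1 = [] := PySem.List.pyRange_one_eq_nil (by omega)
  have hrep : ∀ xs : List Char, PySem.List.pyRepeat xs div = [] := by
    intro xs; unfold PySem.List.pyRepeat
    have : div.toNat = 0 := by omega
    simp [this]
  simp only [hm, hrange, hrep]
  rw [if_neg (fun h : (0:Int) ≠ 0 => h rfl), if_neg (fun h : (0:Int) ≠ 0 => h rfl)]
  simp only [List.all_nil]
  intro hcontra
  have := (beq_iff_eq).mp hcontra.symm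
  exact toChars_ne_nil num this
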